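-- pv_equiv track=rewrite | github.com/1droozd1/MAI_Labs | 3_course/5 term/algorithms/contest/22_09/c.py | can_find_two_good_markers
-- ===== SOURCE A (Python) =====
-- def can_find_two_good_markers(t, test_cases):
--     results = []
--
--     for case in test_cases:
--         n = case[0]
--         a = case[1]
--         b = case[2]
--
--         total_good = sum(b)
--         total_bad = sum(a)
--
--         possible = False
--
--         for x in range(n):
--             good_except_x = total_good - b[x]
--             if good_except_x > total_bad:
--                 continue
--
--             valid = True
--             for y in range(n):
--                 if y != x and b[y] > total_bad - a[y]:
--                     valid = False
--                     break
--
--             if valid: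
--                 possible = True
--                 break
--
--         if possible:
--             results.append("YES")
--         else:
--             results.append("NO")
--
--     return results
-- ===== SOURCE B (Python) =====
-- def can_find_two_good_markers(t, test_cases):
--     results = []
--     for n, a, b in test_cases:
--         total_good = sum(b)
--         total_bad = sum(a)
--         # indices that violate the "every other marker" condition
--         violators = [y for y in range(n) if b[y] > total_bad - a[y]]
--         if len(violators) == 0:
--             ok = any(total_good - b[x] <= total_bad for x in range(n))
--         elif len(violators) == 1:
--             x = violators[0]
--             ok = total_good - b[x] <= total_bad
--         else:
--             ok = False
--         results.append("YES" if ok else "NO")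
--     return results
-- ===== Notes on version B (the rewrite author's own statement) =====
-- stated objective: alternative
-- what changed: Instead of trying every candidate x and rescanning all other indices for each (nested loops, worst-case quadratic), B computes the violating-index list once per case; a valid x exists iff that list is empty (then any x with enough good ink works) or is exactly one index that itself passes the good-ink check — one pass per case.
-- outside the precondition, e.g. on can_find_two_good_markers(1, [(1, [], [5])]): A returns ['YES'], B raises IndexError
import Mathlib
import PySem

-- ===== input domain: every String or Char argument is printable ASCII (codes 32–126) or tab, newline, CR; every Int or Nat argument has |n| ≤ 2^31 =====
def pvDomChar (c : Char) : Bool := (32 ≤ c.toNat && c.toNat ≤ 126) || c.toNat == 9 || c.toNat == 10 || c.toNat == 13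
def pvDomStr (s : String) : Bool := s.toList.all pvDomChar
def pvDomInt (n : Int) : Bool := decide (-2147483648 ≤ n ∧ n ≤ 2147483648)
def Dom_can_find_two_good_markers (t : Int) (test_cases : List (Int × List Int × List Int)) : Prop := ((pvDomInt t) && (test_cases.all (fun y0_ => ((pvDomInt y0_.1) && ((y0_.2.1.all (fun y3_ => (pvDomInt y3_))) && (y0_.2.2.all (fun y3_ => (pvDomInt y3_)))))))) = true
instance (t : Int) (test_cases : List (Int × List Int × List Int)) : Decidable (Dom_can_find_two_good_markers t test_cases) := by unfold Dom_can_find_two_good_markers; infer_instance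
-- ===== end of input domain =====

-- B replaces A's nested scan (for each candidate x, rescan all other indices) by computing the
-- violating-index list computed once per case; objective: alternative (one pass per case).

-- ===== PORT A =====
-- inner 'for y in range(n)' loop of A: returns the final value of 'valid' (break = early false)
def pvAInner (x : Int) (total_bad : Int) (a b : List Int) : List Int → Bool
  | [] => true
  | y :: ys =>
    if y ≠ x ∧ (PySem.List.pyGetD b y 0) > total_bad - (PySem.List.pyGetD a y 0) then
      false
    else
      pvAInner x total_bad a b ys

-- outer 'for x in range(n)' loop of A: returns the final value of 'possible' (break = early true)
def pvAOuter (n total_good total_bad : Int) (a b : List Int) : List Int → Bool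
  | [] => false
  | x :: xs =>
    if total_good - (PySem.List.pyGetD b x 0) > total_bad then
      pvAOuter n total_good total_bad a b xs
    else if pvAInner x total_bad a b (PySem.List.pyRange 0 n 1) then
      true
    else
      pvAOuter n total_good total_bad a b xs

def can_find_two_good_markers (t : Int) (test_cases : List (Int × List Int × List Int)) : List String :=
  test_cases.foldl (fun results case =>
    let n : Int := case.1
    let a : List Int := case.2.1
    let b : List Int := case.2.2
    let total_good : Int := b.sum
    let total_bad : Int := a.sum
    let possible := pvAOuter n total_good total_bad a b (PySem.List.pyRange 0 n 1)
    results ++ [if possible then "YES" else "NO"]) []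

-- ===== PORT B =====
def can_find_two_good_markers_alt (t : Int) (test_cases : List (Int × List Int × List Int)) : List String :=
  test_cases.foldl (fun results case =>
    let n : Int := case.1
    let a : List Int := case.2.1
    let b : List Int := case.2.2
    let total_good : Int := b.sum
    let total_bad : Int := a.sum
    let violators := (PySem.List.pyRange 0 n 1).filter
      (fun y => decide ((PySem.List.pyGetD b y 0) > total_bad - (PySem.List.pyGetD a y 0)))
    let ok : Bool :=
      match violators with
      | [] => (PySem.List.pyRange 0 n 1).any
                (fun x => decide (total_good - (PySem.List.pyGetD b x 0) ≤ total_bad))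
      | [x] => decide (total_good - (PySem.List.pyGetD b x 0) ≤ total_bad)
      | _ => false
    results ++ [if ok then "YES" else "NO"]) []

-- ===== PRECONDITION & SPEC =====
-- Pre_ excludes exactly the cases on which the Python A raises IndexError (n exceeding a list's
-- length), plus the accidental corners where n > len(a) or n > len(b) but A returns because its
-- loops happen never to touch the missing index (e.g. n = 1 with a = []); B raises IndexError there.
def Pre_can_find_two_good_markers (t : Int) (test_cases : List (Int × List Int × List Int)) : Prop :=
  ∀ c ∈ test_cases, c.1 ≤ 0 ∨ (c.1 ≤ (c.2.1.length : Int) ∧ c.1 ≤ (c.2.2.length : Int))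
instance (t : Int) (test_cases : List (Int × List Int × List Int)) : Decidable (Pre_can_find_two_good_markers t test_cases) := by unfold Pre_can_find_two_good_markers; infer_instance
def pvWitness_can_find_two_good_markers : Int × (List (Int × List Int × List Int)) :=
  (2, [(2, [1, 3], [2, 2]), (1, [5], [9])])

def Spec_can_find_two_good_markers (t : Int) (test_cases : List (Int × List Int × List Int)) (out : List String) : Prop := out = can_find_two_good_markers_alt t test_cases
instance (t : Int) (test_cases : List (Int × List Int × List Int)) (out : List String) : Decidable (Spec_can_find_two_good_markers t test_cases out) := by unfold Spec_can_find_two_good_markers; infer_instance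

-- ===== CLAIM (what is proved, stated in full; the proofs are below) =====
def Claim_equal_can_find_two_good_markers : Prop := ∀ (t : Int) (test_cases : List (Int × List Int × List Int)), Dom_can_find_two_good_markers t test_cases → Pre_can_find_two_good_markers t test_cases → Spec_can_find_two_good_markers t test_cases (can_find_two_good_markers t test_cases)

-- ===== LEMMAS AND PROOFS =====

-- A's inner loop is an 'all' over the scanned indices
theorem pvAInner_eq_all (x total_bad : Int) (a b : List Int) (ys : List Int) :
    pvAInner x total_bad a b ys
      = ys.all (fun y => decide (y = x) || !decide ((PySem.List.pyGetD b y 0) > total_bad - (PySem.List.pyGetD a y 0))) := by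
  induction ys with
  | nil => rfl
  | cons y ys ih =>
    simp only [pvAInner, List.all_cons, ih]
    by_cases h1 : y = x <;> by_cases h2 : (PySem.List.pyGetD b y 0) > total_bad - (PySem.List.pyGetD a y 0) <;>
      simp [h1, h2]

-- A's outer loop is an 'any' over the scanned candidates
theorem pvAOuter_eq_any (n total_good total_bad : Int) (a b : List Int) (xs : List Int) :
    pvAOuter n total_good total_bad a b xs
      = xs.any (fun x => decide (total_good - (PySem.List.pyGetD b x 0) ≤ total_bad)
                 && pvAInner x total_bad a b (PySem.List.pyRange 0 n 1)) := by
  induction xs with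
  | nil => rfl
  | cons x xs ih =>
    simp only [pvAOuter, List.any_cons, ih]
    by_cases h1 : total_good - (PySem.List.pyGetD b x 0) ≤ total_bad
    · rw [if_neg (by omega)]
      cases h2 : pvAInner x total_bad a b (PySem.List.pyRange 0 n 1) with
      | false => rw [if_neg (by simp [h2]), Bool.and_false, Bool.false_or]
      | true => rw [if_pos (by simp [h2]), decide_eq_true h1, Bool.true_and, Bool.true_or]
    · rw [if_pos (by omega), decide_eq_false h1, Bool.false_and, Bool.false_or]

-- core: a linear search for x with 'c x' and 'no violator other than x' equals
-- the case split on the (duplicate-free) violator list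
theorem pvSearch_eq (R : List Int) (p c : Int → Bool) (hnd : R.Nodup) :
    R.any (fun x => c x && R.all (fun y => decide (y = x) || !p y))
      = (match R.filter p with
         | [] => R.any c
         | [v] => c v
         | _ => false) := by
  rcases hfc : R.filter p with _ | ⟨v, _ | ⟨w, rest⟩⟩
  · -- no violators
    have hnone : ∀ y ∈ R, p y = false := by
      intro y hy
      by_contra h
      have hmem : y ∈ R.filter p := List.mem_filter.mpr ⟨hy, by simpa using h⟩
      simp [hfc] at hmem
    rw [Bool.eq_iff_iff]
    simp only [List.any_eq_true, Bool.and_eq_true, List.all_eq_true]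
    constructor
    · rintro ⟨x, hxR, hcx, _⟩
      exact ⟨x, hxR, hcx⟩
    · rintro ⟨x, hxR, hcx⟩
      refine ⟨x, hxR, hcx, ?_⟩
      intro y hy
      simp [hnone y hy]
  · -- exactly one violator v
    have hv : v ∈ R ∧ p v = true := List.mem_filter.mp (by simp [hfc])
    have huniq : ∀ y ∈ R, p y = true → y = v := by
      intro y hy hpy
      have hmem : y ∈ R.filter p := List.mem_filter.mpr ⟨hy, hpy⟩
      simpa [hfc] using hmem
    rw [Bool.eq_iff_iff]
    simp only [List.any_eq_true, Bool.and_eq_true, List.all_eq_true]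
    constructor
    · rintro ⟨x, hxR, hcx, hall⟩
      have hvx := hall v hv.1
      simp only [Bool.or_eq_true, decide_eq_true_eq, Bool.not_eq_true'] at hvx
      rcases hvx with h | h
      · exact h ▸ hcx
      · rw [hv.2] at h; cases h
    · intro hcv
      refine ⟨v, hv.1, hcv, ?_⟩
      intro y hy
      simp only [Bool.or_eq_true, decide_eq_true_eq, Bool.not_eq_true']
      by_cases hpy : p y = true
      · exact Or.inl (huniq y hy hpy)
      · exact Or.inr (by simpa using hpy)
  · -- two or more violators: both sides false
    have hvmem : v ∈ R.filter p := by simp [hfc]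
    have hwmem : w ∈ R.filter p := by simp [hfc]
    have hvw : v ≠ w := by
      have hnd2 : (R.filter p).Nodup := hnd.filter p
      rw [hfc] at hnd2
      simp only [List.nodup_cons, List.mem_cons] at hnd2
      intro h
      exact hnd2.1 (Or.inl h)
    rw [Bool.eq_false_iff]
    intro h
    rw [List.any_eq_true] at h
    obtain ⟨x, hxR, hx⟩ := h
    rw [Bool.and_eq_true, List.all_eq_true] at hx
    have key : ∀ z ∈ R.filter p, z = x := by
      intro z hz
      obtain ⟨hzR, hpz⟩ := List.mem_filter.mp hz
      have := hx.2 z hzR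
      simp only [Bool.or_eq_true, decide_eq_true_eq, Bool.not_eq_true'] at this
      rcases this with h | h
      · exact h
      · rw [hpz] at h; cases h
    exact hvw ((key v hvmem).trans (key w hwmem).symm)

-- the per-case core equivalence: A's nested search equals B's violator-set case split
theorem pvCase_eq (n total_good total_bad : Int) (a b : List Int) :
    pvAOuter n total_good total_bad a b (PySem.List.pyRange 0 n 1)
      = (match (PySem.List.pyRange 0 n 1).filter
            (fun y => decide ((PySem.List.pyGetD b y 0) > total_bad - (PySem.List.pyGetD a y 0))) with
         | [] => (PySem.List.pyRange 0 n 1).any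
                   (fun x => decide (total_good - (PySem.List.pyGetD b x 0) ≤ total_bad))
         | [v] => decide (total_good - (PySem.List.pyGetD b v 0) ≤ total_bad)
         | _ => false) := by
  rw [pvAOuter_eq_any]
  have h : ∀ x, pvAInner x total_bad a b (PySem.List.pyRange 0 n 1)
      = (PySem.List.pyRange 0 n 1).all
          (fun y => decide (y = x) || !decide ((PySem.List.pyGetD b y 0) > total_bad - (PySem.List.pyGetD a y 0))) :=
    fun x => pvAInner_eq_all x total_bad a b _
  simp only [h]
  exact pvSearch_eq (PySem.List.pyRange 0 n 1)
    (fun y => decide ((PySem.List.pyGetD b y 0) > total_bad - (PySem.List.pyGetD a y 0)))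
    (fun x => decide (total_good - (PySem.List.pyGetD b x 0) ≤ total_bad))
    (PySem.List.nodup_pyRange_one 0 n)

-- the two folds produce the same list (same per-case verdict)
theorem pvFold_eq (test_cases : List (Int × List Int × List Int)) (acc : List String) :
    test_cases.foldl (fun results case =>
      results ++ [if pvAOuter case.1 case.2.2.sum case.2.1.sum case.2.1 case.2.2
                        (PySem.List.pyRange 0 case.1 1) then "YES" else "NO"]) acc
    = test_cases.foldl (fun results case =>
      results ++ [if (match (PySem.List.pyRange 0 case.1 1).filter
              (fun y => decide ((PySem.List.pyGetD case.2.2 y 0) > case.2.1.sum - (PySem.List.pyGetD case.2.1 y 0))) with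
           | [] => (PySem.List.pyRange 0 case.1 1).any
                     (fun x => decide (case.2.2.sum - (PySem.List.pyGetD case.2.2 x 0) ≤ case.2.1.sum))
           | [v] => decide (case.2.2.sum - (PySem.List.pyGetD case.2.2 v 0) ≤ case.2.1.sum)
           | _ => false) then "YES" else "NO"]) acc := by
  induction test_cases generalizing acc with
  | nil => rfl
  | cons case rest ih =>
    simp only [List.foldl_cons]
    rw [pvCase_eq case.1 case.2.2.sum case.2.1.sum case.2.1 case.2.2, ih]

-- ===== VERDICT (by name: the statement is the Claim_ definition above) =====
theorem can_find_two_good_markers_spec : Claim_equal_can_find_two_good_markers := by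
  intro t test_cases _ _
  unfold Spec_can_find_two_good_markers can_find_two_good_markers can_find_two_good_markers_alt
  exact pvFold_eq test_cases []
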